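-- pv_equiv track=rewrite | github.com/Trabajo-profesional-grupo-7/planner | app/services/helpers.py | check_type_completed
-- ===== SOURCE A (Python) =====
-- def check_type_completed(types: dict[str, int], max_type_amount: int, attraction):
--     type_completed = False
--     for type in attraction["types"]:
--         type_amount = types.get(type)
--         if not type_amount:
--             continue
--
--         if type_amount >= max_type_amount:
--             type_completed = True
--
--     return type_completed
-- ===== SOURCE B (Python) =====
-- def check_type_completed(types: dict[str, int], max_type_amount: int, attraction):
--     maxed = {t for t, v in types.items() if v and v >= max_type_amount}
--     return not maxed.isdisjoint(attraction["types"])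
-- ===== Notes on version B (the rewrite author's own statement) =====
-- stated objective: alternative
-- what changed: Instead of looping over attraction['types'] with a per-element dict lookup and a mutable flag, B first scans types.items() once to build the set of maxed-out type names and then returns a single set-disjointness test against attraction['types'].
import Mathlib
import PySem

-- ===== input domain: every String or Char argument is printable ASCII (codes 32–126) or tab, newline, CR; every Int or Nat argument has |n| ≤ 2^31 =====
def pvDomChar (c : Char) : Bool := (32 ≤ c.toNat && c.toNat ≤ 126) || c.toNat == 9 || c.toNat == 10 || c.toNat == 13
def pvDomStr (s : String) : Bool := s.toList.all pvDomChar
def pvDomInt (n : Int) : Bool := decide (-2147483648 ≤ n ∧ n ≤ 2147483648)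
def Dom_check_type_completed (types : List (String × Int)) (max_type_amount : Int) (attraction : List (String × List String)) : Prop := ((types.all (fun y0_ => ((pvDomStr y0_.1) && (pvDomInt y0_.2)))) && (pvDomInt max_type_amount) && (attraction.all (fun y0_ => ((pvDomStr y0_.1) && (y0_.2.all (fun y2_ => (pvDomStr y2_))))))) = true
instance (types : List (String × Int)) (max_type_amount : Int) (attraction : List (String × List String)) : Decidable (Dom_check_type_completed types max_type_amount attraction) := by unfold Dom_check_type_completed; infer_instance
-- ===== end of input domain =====

-- B builds the set of maxed-out type names in one pass over `types` and returns a single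
-- set-disjointness test against attraction["types"] (alternative decomposition, same cost).

-- ===== PORT A =====
def check_type_completed (types : List (String × Int)) (max_type_amount : Int) (attraction : List (String × List String)) : Bool :=
  match (PySem.Dict.mk attraction).get? "types" with
  | none => false   -- Python raises KeyError here; excluded by Pre_
  | some ats =>
    ats.foldl (fun type_completed t =>
      match (PySem.Dict.mk types).get? t with
      | none => type_completed                     -- types.get(type) is None → continue
      | some v =>
        if v = 0 then type_completed               -- `not type_amount` on 0 → continue
        else if v ≥ max_type_amount then true else type_completed) false

-- ===== PORT B =====
def check_type_completed_alt (types : List (String × Int)) (max_type_amount : Int) (attraction : List (String × List String)) : Bool :=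
  let maxed : PySem.Set String :=
    PySem.Set.ofList ((types.filter (fun p => p.2 ≠ 0 && p.2 ≥ max_type_amount)).map Prod.fst)
  match (PySem.Dict.mk attraction).get? "types" with
  | none => false   -- Python raises KeyError here; excluded by Pre_
  | some ats => !(PySem.Set.isdisjoint maxed ats)

-- ===== PRECONDITION & SPEC =====
-- Pre_ excludes (i) attractions without a "types" key, on which A raises KeyError, and
-- (ii) `types` association lists with duplicate keys, which cannot arise from a Python dict
-- (there the first-match lookup order of an assoc list is accidental).
def Pre_check_type_completed (types : List (String × Int)) (max_type_amount : Int) (attraction : List (String × List String)) : Prop :=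
  ((PySem.Dict.mk attraction).get? "types").isSome ∧ (types.map Prod.fst).Nodup
instance (types : List (String × Int)) (max_type_amount : Int) (attraction : List (String × List String)) : Decidable (Pre_check_type_completed types max_type_amount attraction) := by unfold Pre_check_type_completed; infer_instance
def pvWitness_check_type_completed : (List (String × Int)) × Int × (List (String × List String)) :=
  ([("zoo", 3), ("museum", 0)], 2, [("types", ["zoo", "park"])])

def Spec_check_type_completed (types : List (String × Int)) (max_type_amount : Int) (attraction : List (String × List String)) (out : Bool) : Prop := out = check_type_completed_alt types max_type_amount attraction
instance (types : List (String × Int)) (max_type_amount : Int) (attraction : List (String × List String)) (out : Bool) : Decidable (Spec_check_type_completed types max_type_amount attraction out) := by unfold Spec_check_type_completed; infer_instance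

-- ===== CLAIM (what is proved, stated in full; the proofs are below) =====
def Claim_equal_check_type_completed : Prop := ∀ (types : List (String × Int)) (max_type_amount : Int) (attraction : List (String × List String)), Dom_check_type_completed types max_type_amount attraction → Pre_check_type_completed types max_type_amount attraction → Spec_check_type_completed types max_type_amount attraction (check_type_completed types max_type_amount attraction)

-- ===== LEMMAS AND PROOFS =====

-- the per-element test A applies (first-match lookup, nonzero, above threshold)
def pvHit (types : List (String × Int)) (max_type_amount : Int) (t : String) : Bool :=
  match (PySem.Dict.mk types).get? t with
  | none => false
  | some v => !(v = 0 : Bool) && (v ≥ max_type_amount)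

theorem pvFoldA (types : List (String × Int)) (max_type_amount : Int) :
    ∀ (ats : List String) (acc : Bool),
      ats.foldl (fun type_completed t =>
        match (PySem.Dict.mk types).get? t with
        | none => type_completed
        | some v =>
          if v = 0 then type_completed
          else if v ≥ max_type_amount then true else type_completed) acc
      = (acc || ats.any (pvHit types max_type_amount)) := by
  intro ats
  induction ats with
  | nil => simp
  | cons t rest ih =>
    intro acc
    simp only [List.foldl_cons, List.any_cons, ih]
    unfold pvHit
    cases h : (PySem.Dict.mk types).get? t with
    | none => simp
    | some v =>
      by_cases h0 : v = 0 <;> by_cases hm : v ≥ max_type_amount <;>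
        simp [h0, hm] <;> cases acc <;> simp

theorem pvGetMk (types : List (String × Int)) (t : String) (v : Int)
    (hnd : (types.map Prod.fst).Nodup) :
    (PySem.Dict.mk types).get? t = some v ↔ (t, v) ∈ types := by
  induction types with
  | nil => simp [PySem.Dict.get?_mk_cons]; simp [PySem.Dict.get?]
  | cons p rest ih =>
    simp only [List.map_cons, List.nodup_cons] at hnd
    rw [show (p :: rest) = ((p.1, p.2) :: rest) by simp, PySem.Dict.get?_mk_cons]
    by_cases he : p.1 = t
    · subst he
      simp only [beq_self_eq_true, if_true, List.mem_cons]
      constructor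
      · rintro h; injection h with h; left; rw [h]
      · rintro (h | h)
        · injection h with _ h2; rw [h2]
        · exact absurd (List.mem_map_of_mem (f := Prod.fst) h) (by simpa using hnd.1)
    · simp only [beq_iff_eq, he, if_false, ih hnd.2, List.mem_cons]
      constructor
      · exact Or.inr
      · rintro (h | h)
        · exact absurd (congrArg Prod.fst h).symm he
        · exact h

theorem pvMemMaxed (types : List (String × Int)) (max_type_amount : Int) (t : String)
    (hnd : (types.map Prod.fst).Nodup) :
    (t ∈ PySem.Set.ofList ((types.filter (fun p => p.2 ≠ 0 && p.2 ≥ max_type_amount)).map Prod.fst))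
      ↔ pvHit types max_type_amount t = true := by
  rw [PySem.Set.mem_ofList]
  unfold pvHit
  constructor
  · intro h
    obtain ⟨p, hp, hfst⟩ := List.mem_map.1 h
    obtain ⟨hp, hcond⟩ := List.mem_filter.1 hp
    have : (PySem.Dict.mk types).get? t = some p.2 := by
      rw [pvGetMk types t p.2 hnd]; rw [← hfst]; exact hp
    rw [this]
    simpa using hcond
  · intro h
    cases hg : (PySem.Dict.mk types).get? t with
    | none => rw [hg] at h; simp at h
    | some v =>
      rw [hg] at h
      refine List.mem_map.2 ⟨(t, v), List.mem_filter.2 ⟨(pvGetMk types t v hnd).1 hg, ?_⟩, rfl⟩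
      simpa using h

-- ===== VERDICT (by name: the statement is the Claim_ definition above) =====
theorem check_type_completed_spec : Claim_equal_check_type_completed := by
  intro types max_type_amount attraction _ hpre
  obtain ⟨hk, hnd⟩ := hpre
  unfold Spec_check_type_completed check_type_completed check_type_completed_alt
  cases hg : (PySem.Dict.mk attraction).get? "types" with
  | none => simp [hg] at hk
  | some ats =>
    simp only [pvFoldA, Bool.false_or]
    rw [Bool.eq_iff_iff, List.any_eq_true, Bool.not_eq_true',
        ← Bool.not_eq_true (PySem.Set.isdisjoint _ _), PySem.Set.isdisjoint_iff]
    push_neg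
    constructor
    · rintro ⟨t, ht, hhit⟩
      exact ⟨t, (pvMemMaxed types max_type_amount t hnd).2 hhit, ht⟩
    · rintro ⟨t, hm, ht⟩
      exact ⟨t, ht, (pvMemMaxed types max_type_amount t hnd).1 hm⟩
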